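-- pv_equiv track=rewrite | github.com/FrankJames/project-euler | 20 - 29/euler24.py | find_permutation_row
-- ===== SOURCE A (Python) =====
-- import math
--
-- def find_permutation_row(list_numbers, x):
-- 	# find out the length of each permutation row
-- 	row_length = math.factorial(len(list_numbers) - 1)
-- 	# start off at row 1
-- 	row = row_length
-- 	which_row = 0
-- 	# while we still have not found the correct row yet
-- 	while(row < x):
-- 		# proceed to the next row
-- 		row += row_length
-- 		which_row += 1
-- 	return which_row
-- ===== SOURCE B (Python) =====
-- import math
--
-- def find_permutation_row(list_numbers, x):
--     row_length = math.factorial(len(list_numbers) - 1)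
--     return max(0, (x - 1) // row_length)
-- ===== Notes on version B (the rewrite author's own statement) =====
-- stated objective: simpler
-- what changed: Replaces the while-loop scan over permutation rows with the closed-form floor division max(0,(x-1)//row_length).
import Mathlib
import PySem

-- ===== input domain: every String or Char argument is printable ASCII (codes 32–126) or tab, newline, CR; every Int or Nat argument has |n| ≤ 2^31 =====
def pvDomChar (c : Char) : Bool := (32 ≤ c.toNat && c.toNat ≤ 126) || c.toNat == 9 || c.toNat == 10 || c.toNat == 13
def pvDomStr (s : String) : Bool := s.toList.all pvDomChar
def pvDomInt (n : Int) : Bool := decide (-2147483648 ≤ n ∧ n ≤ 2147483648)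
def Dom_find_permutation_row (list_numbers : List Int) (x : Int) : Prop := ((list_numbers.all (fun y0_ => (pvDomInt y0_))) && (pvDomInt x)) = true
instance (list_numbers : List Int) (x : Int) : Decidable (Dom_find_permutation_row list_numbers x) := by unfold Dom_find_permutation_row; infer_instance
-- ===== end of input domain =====

-- B replaces A's while-loop over permutation rows by the closed form max(0,(x-1)//row_length); objective: simpler (runtime is dominated by the factorial in both).

-- ===== PORT A =====
-- the while loop of A: `while row < x: row += row_length; which_row += 1`
-- (0 < rl is a termination hypothesis only; A's row_length = (len-1)! is always positive)
def pvLoopA (rl x : Int) (hrl : 0 < rl) (row which_row : Int) : Int :=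
  if row < x then pvLoopA rl x hrl (row + rl) (which_row + 1) else which_row
termination_by (x - row).toNat
decreasing_by omega

def find_permutation_row (list_numbers : List Int) (x : Int) : Int :=
  let row_length : Int := (Nat.factorial (list_numbers.length - 1) : Int)
  pvLoopA row_length x (Int.natCast_pos.mpr (Nat.factorial_pos _)) row_length 0

-- ===== PORT B =====
def find_permutation_row_alt (list_numbers : List Int) (x : Int) : Int :=
  let row_length : Int := (Nat.factorial (list_numbers.length - 1) : Int)
  max 0 (PySem.Int.floordiv (x - 1) row_length)

-- ===== PRECONDITION & SPEC =====
-- Pre_ excludes the empty list, on which Python's math.factorial(-1) raises ValueError.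
def Pre_find_permutation_row (list_numbers : List Int) (x : Int) : Prop := list_numbers ≠ []
instance (list_numbers : List Int) (x : Int) : Decidable (Pre_find_permutation_row list_numbers x) := by unfold Pre_find_permutation_row; infer_instance
def pvWitness_find_permutation_row : List Int × Int := ([1, 2], 5)

def Spec_find_permutation_row (list_numbers : List Int) (x : Int) (out : Int) : Prop := out = find_permutation_row_alt list_numbers x
instance (list_numbers : List Int) (x : Int) (out : Int) : Decidable (Spec_find_permutation_row list_numbers x out) := by unfold Spec_find_permutation_row; infer_instance

-- ===== CLAIM (what is proved, stated in full; the proofs are below) =====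
def Claim_equal_find_permutation_row : Prop := ∀ (list_numbers : List Int) (x : Int), Dom_find_permutation_row list_numbers x → Pre_find_permutation_row list_numbers x → Spec_find_permutation_row list_numbers x (find_permutation_row list_numbers x)

-- ===== LEMMAS AND PROOFS =====

theorem pvLoopA_closed (rl x : Int) (hrl : 0 < rl) (row w : Int) :
    pvLoopA rl x hrl row w = w + max 0 (PySem.Int.floordiv (x - row - 1) rl + 1) := by
  rw [pvLoopA]
  rw [PySem.Int.floordiv_eq_ediv_of_pos hrl]
  split_ifs with hlt
  · rw [pvLoopA_closed rl x hrl (row + rl) (w + 1)]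
    rw [PySem.Int.floordiv_eq_ediv_of_pos hrl]
    have ha : 0 ≤ x - row - 1 := by omega
    have h1 : (x - row - 1) / rl = (x - (row + rl) - 1) / rl + 1 := by
      have := Int.add_mul_ediv_right (x - (row + rl) - 1) 1 (by omega : rl ≠ 0)
      have heq : x - (row + rl) - 1 + 1 * rl = x - row - 1 := by ring
      rw [heq] at this
      omega
    have h2 : 0 ≤ (x - row - 1) / rl := Int.ediv_nonneg ha (by omega)
    omega
  · have ha : x - row - 1 < 0 := by omega
    have : (x - row - 1) / rl < 0 := Int.ediv_neg_of_neg_of_pos ha hrl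
    omega
termination_by (x - row).toNat
decreasing_by omega

-- ===== VERDICT (by name: the statement is the Claim_ definition above) =====
theorem find_permutation_row_spec : Claim_equal_find_permutation_row := by
  intro list_numbers x _ _
  unfold Spec_find_permutation_row find_permutation_row find_permutation_row_alt
  set rl : Int := (Nat.factorial (list_numbers.length - 1) : Int) with hrl
  have hpos : 0 < rl := Int.natCast_pos.mpr (Nat.factorial_pos _)
  show pvLoopA rl x _ rl 0 = max 0 (PySem.Int.floordiv (x - 1) rl)
  rw [pvLoopA_closed]
  rw [PySem.Int.floordiv_eq_ediv_of_pos hpos, PySem.Int.floordiv_eq_ediv_of_pos hpos]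
  have := Int.add_mul_ediv_right (x - rl - 1) 1 (by omega : rl ≠ 0)
  have heq : x - rl - 1 + 1 * rl = x - 1 := by ring
  rw [heq] at this
  omega
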